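-- pv_equiv track=rewrite | github.com/Roger-Phydev/Exercises-ejercicios-2 | 13.py | oct_and_hex
-- ===== SOURCE A (Python) =====
-- def oct_and_hex(number):
--     if type(number)==int:
--         if number>=0: #si el número es positivo hacemos esto
--             representation = ["",""]
--             numbers = list("0123456789ABCDEF")#creamos una lista con símbolos
--             for i in [0,1]:#para cada indice:
--                 n = number #iniciamos una variable con el valor del número
--                 while n>=1:
--                     d = n%(8*(i+1)) #calculamos el residuo de dividir por 8 o 16
--                     representation[i]=numbers[d]+representation[i] #añadimos el coeficiente correspondiente al inicio y no al final
--                     n = (n-d)//(8*(i+1))#ahora a n le restamos el residuo y dividimos por 8o 16 y lo hacemos entero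
--             return representation
--         else:
--             return ["-"+oct_and_hex(-number)[0],"-"+oct_and_hex(-number)[1]] #si no, le aplicamos a su negativo y añadimos un signo menos
-- ===== SOURCE B (Python) =====
-- def oct_and_hex(number):
--     if type(number) != int:
--         return None
--
--     def conv(n, base):
--         # recursive base conversion; conv(0, base) == "" just like A's loop
--         if n <= 0:
--             return ""
--         return conv(n // base, base) + "0123456789ABCDEF"[n % base]
--
--     if number >= 0:
--         return [conv(number, 8), conv(number, 16)]
--     return ["-" + conv(-number, 8), "-" + conv(-number, 16)]
-- ===== Notes on version B (the rewrite author's own statement) =====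
-- stated objective: simpler
-- what changed: Replaces A's iterative digit-prepend while-loops (run once per base, mutating a list in place, plus self-recursion for negatives) with a single recursive helper conv(n, base) that recurses on n//base and appends the least-significant digit on the way back up.
import Mathlib
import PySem

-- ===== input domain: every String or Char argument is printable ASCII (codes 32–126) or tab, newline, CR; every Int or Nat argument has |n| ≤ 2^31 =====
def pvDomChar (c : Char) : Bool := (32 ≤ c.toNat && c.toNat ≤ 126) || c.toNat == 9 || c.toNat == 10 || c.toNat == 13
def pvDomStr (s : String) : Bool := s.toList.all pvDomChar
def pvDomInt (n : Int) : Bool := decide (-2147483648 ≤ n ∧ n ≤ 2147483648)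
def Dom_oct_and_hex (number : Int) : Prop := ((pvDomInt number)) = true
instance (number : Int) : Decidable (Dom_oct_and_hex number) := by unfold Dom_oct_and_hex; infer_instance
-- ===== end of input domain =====

-- B replaces A's two iterative digit-prepend while-loops (and self-recursion for
-- negatives) with one recursive helper conv that appends digits on the way back up;
-- objective: simpler.

-- termination helper: cited by the decreasing_by clauses of the ports below
theorem pv_ediv_lt_self (n base : Int) (hn : 1 ≤ n) (hb : 2 ≤ base) : n / base < n := by
  have hm : base * (n / base) + n % base = n := Int.mul_ediv_add_emod n base
  have hr : 0 ≤ n % base := Int.emod_nonneg n (by omega)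
  have h5 : 0 ≤ n / base := Int.ediv_nonneg (by omega) (by omega)
  by_contra hc
  rw [not_lt] at hc
  have : 2 * (n / base) ≤ base * (n / base) := Int.mul_le_mul_of_nonneg_right (by omega) h5
  omega

-- ===== PORT A =====
-- numbers = list("0123456789ABCDEF")
def pvNumbersA : List Char := "0123456789ABCDEF".toList

-- the body of A's while-loop for one index i (base = 8*(i+1), here passed with a
-- proof 2 ≤ base used only for termination); numbers[d] is always in range
-- (0 ≤ d < base ≤ 16), so pyGetD's default is never taken.
def pvLoopA (base : Int) (hb : 2 ≤ base) (n : Int) (rep : String) : String :=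
  if _h : n ≥ 1 then
    let d := PySem.Int.mod n base
    pvLoopA base hb (PySem.Int.floordiv (n - d) base)
      (String.ofList [PySem.List.pyGetD pvNumbersA d ' '] ++ rep)
  else rep
termination_by n.toNat
decreasing_by
  have hd : PySem.Int.mod n base = n % base := PySem.Int.mod_eq_emod_of_pos (by omega)
  have hq : PySem.Int.floordiv (n - PySem.Int.mod n base) base = (n - n % base) / base :=
    hd ▸ PySem.Int.floordiv_eq_ediv_of_pos (by omega)
  have h2 : (n - n % base) = base * (n / base) := by
    have := Int.mul_ediv_add_emod n base; omega
  have h3 : (n - n % base) / base = n / base := by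
    rw [h2, Int.mul_ediv_cancel_left _ (by omega : base ≠ 0)]
  have h4 : n / base < n := pv_ediv_lt_self n base (by omega) hb
  have h5 : 0 ≤ n / base := Int.ediv_nonneg (by omega) (by omega)
  simp only [hq, h3]
  omega

def oct_and_hex (number : Int) : List String :=
  if number ≥ 0 then
    -- for i in [0,1], unrolled: representation[0] then representation[1]
    let rep0 := pvLoopA (8 * (0 + 1)) (by norm_num) number ""
    let rep1 := pvLoopA (8 * (1 + 1)) (by norm_num) number ""
    [rep0, rep1]
  else
    let r := oct_and_hex (-number)
    ["-" ++ PySem.List.pyGetD r 0 "", "-" ++ PySem.List.pyGetD r 1 ""]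
termination_by (if number ≥ 0 then 0 else 1)
decreasing_by split_ifs <;> omega

-- ===== PORT B =====
-- conv(n, base): "" at n <= 0, else conv(n // base, base) + "0123456789ABCDEF"[n % base]
def pvConvB (base : Int) (hb : 2 ≤ base) (n : Int) : String :=
  if _h : n ≤ 0 then ""
  else
    pvConvB base hb (PySem.Int.floordiv n base) ++
      String.ofList [PySem.List.pyGetD ("0123456789ABCDEF".toList) (PySem.Int.mod n base) ' ']
termination_by n.toNat
decreasing_by
  have hq : PySem.Int.floordiv n base = n / base := PySem.Int.floordiv_eq_ediv_of_pos (by omega)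
  have h4 : n / base < n := pv_ediv_lt_self n base (by omega) hb
  simp only [hq]; omega

def oct_and_hex_alt (number : Int) : List String :=
  if number ≥ 0 then
    [pvConvB 8 (by norm_num) number, pvConvB 16 (by norm_num) number]
  else
    ["-" ++ pvConvB 8 (by norm_num) (-number), "-" ++ pvConvB 16 (by norm_num) (-number)]

-- ===== PRECONDITION & SPEC =====
def Spec_oct_and_hex (number : Int) (out : List String) : Prop := out = oct_and_hex_alt number
instance (number : Int) (out : List String) : Decidable (Spec_oct_and_hex number out) := by unfold Spec_oct_and_hex; infer_instance

-- ===== CLAIM (what is proved, stated in full; the proofs are below) =====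
def Claim_equal_oct_and_hex : Prop := ∀ (number : Int), Dom_oct_and_hex number → Spec_oct_and_hex number (oct_and_hex number)

-- ===== LEMMAS AND PROOFS =====

-- A's loop state equals B's recursion result prepended to the accumulator.
theorem pvLoop_eq_conv (base : Int) (hb : 2 ≤ base) (n : Int) (rep : String) :
    pvLoopA base hb n rep = pvConvB base hb n ++ rep := by
  by_cases h : n ≥ 1
  · rw [pvLoopA, pvConvB]
    simp only [h, dif_pos, dif_neg (by omega : ¬ n ≤ 0)]
    have hd : PySem.Int.mod n base = n % base := PySem.Int.mod_eq_emod_of_pos (by omega)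
    have hq : PySem.Int.floordiv (n - PySem.Int.mod n base) base =
        PySem.Int.floordiv n base := by
      rw [hd, PySem.Int.floordiv_eq_ediv_of_pos (by omega : (0:Int) < base),
          PySem.Int.floordiv_eq_ediv_of_pos (by omega : (0:Int) < base)]
      have h2 : (n - n % base) = base * (n / base) := by
        have := Int.mul_ediv_add_emod n base; omega
      rw [h2, Int.mul_ediv_cancel_left _ (by omega : base ≠ 0)]
    rw [hq, pvLoop_eq_conv base hb (PySem.Int.floordiv n base)]
    simp [pvNumbersA, String.append_assoc]
  · rw [pvLoopA, pvConvB]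
    simp only [dif_neg h, dif_pos (by omega : n ≤ 0)]
    simp
termination_by n.toNat
decreasing_by
  have hq : PySem.Int.floordiv n base = n / base := PySem.Int.floordiv_eq_ediv_of_pos (by omega)
  have h4 : n / base < n := pv_ediv_lt_self n base (by omega) hb
  have h5 : 0 ≤ n / base := Int.ediv_nonneg (by omega) (by omega)
  simp only [hq]; omega

theorem pv_main (number : Int) : oct_and_hex number = oct_and_hex_alt number := by
  by_cases h : number ≥ 0
  · rw [oct_and_hex.eq_def, oct_and_hex_alt]
    simp only [if_pos h]
    rw [pvLoop_eq_conv, pvLoop_eq_conv]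
    norm_num
  · rw [oct_and_hex.eq_def, oct_and_hex_alt]
    simp only [if_neg h]
    have hpos : oct_and_hex (-number) =
        [pvConvB 8 (by norm_num) (-number), pvConvB 16 (by norm_num) (-number)] := by
      rw [oct_and_hex.eq_def]
      simp only [if_pos (by omega : -number ≥ 0)]
      rw [pvLoop_eq_conv, pvLoop_eq_conv]
      norm_num
    rw [hpos]
    simp [PySem.List.pyGetD]

-- ===== VERDICT (by name: the statement is the Claim_ definition above) =====
theorem oct_and_hex_spec : Claim_equal_oct_and_hex := by
  intro number _
  unfold Spec_oct_and_hex
  exact pv_main number
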